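-- pv_equiv track=rewrite | github.com/apostolovbg/webcam-micro | devcovenant/core/project_governance.py | _visible_changelog_lines
-- ===== SOURCE A (Python) =====
-- _LOG_MARKER = "## Log changes here"
--
-- _MANAGED_BEGIN = "<!-- DEVCOV:BEGIN -->"
--
-- _MANAGED_END = "<!-- DEVCOV:END -->"
--
-- def _visible_changelog_lines(changelog_text: str) -> list[str]:
--     """Return changelog lines outside managed blocks and fenced examples."""
--     start = changelog_text.find(_LOG_MARKER)
--     content = changelog_text[start:] if start >= 0 else changelog_text
--     visible: list[str] = []
--     in_managed = False
--     in_fence = False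
--     for line in content.splitlines():
--         stripped = line.strip()
--         if stripped == _LOG_MARKER:
--             continue
--         if stripped == _MANAGED_BEGIN:
--             in_managed = True
--             continue
--         if stripped == _MANAGED_END:
--             in_managed = False
--             continue
--         if in_managed:
--             continue
--         if stripped.startswith("```"):
--             in_fence = not in_fence
--             continue
--         if in_fence:
--             continue
--         if stripped:
--             visible.append(stripped)
--     return visible
-- ===== SOURCE B (Python) =====
-- _LOG_MARKER = "## Log changes here"
-- _MANAGED_BEGIN = "<!-- DEVCOV:BEGIN -->"
-- _MANAGED_END = "<!-- DEVCOV:END -->"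
--
--
-- def _classify(stripped):
--     """Map a stripped line to its token kind."""
--     if stripped == _LOG_MARKER:
--         return "skip"
--     if stripped == _MANAGED_BEGIN:
--         return "begin"
--     if stripped == _MANAGED_END:
--         return "end"
--     if stripped.startswith("```"):
--         return "fence"
--     if stripped == "":
--         return "blank"
--     return "text"
--
--
-- def _step(state, stripped):
--     """Fold step over (managed, fence, reversed-accumulator)."""
--     managed, fence, acc = state
--     tag = _classify(stripped)
--     if tag == "skip":
--         return state
--     if tag == "begin":
--         return (True, fence, acc)
--     if tag == "end":
--         return (False, fence, acc)
--     if managed: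
--         return state
--     if tag == "fence":
--         return (managed, not fence, acc)
--     if fence or tag == "blank":
--         return state
--     return (managed, fence, [stripped] + acc)
--
--
-- def _visible_changelog_lines(changelog_text: str) -> list[str]:
--     """Tokenise stripped lines, fold a state machine over them, building the
--     result back-to-front, and reverse at the end."""
--     idx = changelog_text.find(_LOG_MARKER)
--     stripped_lines = [ln.strip() for ln in changelog_text[max(idx, 0):].splitlines()]
--     state = (False, False, [])
--     for s in stripped_lines:
--         state = _step(state, s)
--     return state[2][::-1]
-- ===== Notes on version B (the rewrite author's own statement) =====
-- stated objective: alternative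
-- what changed: A's fused multi-branch scan carrying two flags and appending directly is replaced by a tokenise-then-fold state machine: each stripped line is classified into a token kind by a separate helper, a fold step over a (managed, fence, accumulator) triple consumes the tokens building the result back-to-front, and the list is reversed at the end.
import Mathlib
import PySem

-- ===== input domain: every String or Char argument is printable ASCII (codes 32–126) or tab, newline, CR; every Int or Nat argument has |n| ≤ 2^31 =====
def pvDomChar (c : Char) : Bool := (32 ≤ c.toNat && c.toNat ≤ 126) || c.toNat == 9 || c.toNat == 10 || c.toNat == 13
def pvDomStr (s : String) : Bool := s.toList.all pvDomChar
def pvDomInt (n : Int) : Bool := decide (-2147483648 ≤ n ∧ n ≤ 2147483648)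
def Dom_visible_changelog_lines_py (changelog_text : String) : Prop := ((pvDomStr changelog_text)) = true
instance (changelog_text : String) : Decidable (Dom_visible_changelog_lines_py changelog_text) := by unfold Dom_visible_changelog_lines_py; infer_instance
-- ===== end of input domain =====

-- B replaces A's fused multi-flag scan by a tokenise-then-fold state machine
-- (classify each stripped line, foldl over a (managed, fence, acc) triple,
-- building the result back-to-front); alternative decomposition, same cost.


def pvLogMarker : String := "## Log changes here"
def pvManagedBegin : String := "<!-- DEVCOV:BEGIN -->"
def pvManagedEnd : String := "<!-- DEVCOV:END -->"

-- ===== PORT A =====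
-- A's single loop over the lines, carrying both flags (in_managed, in_fence).
def pvLoopA : List String → Bool → Bool → List String
  | [], _, _ => []
  | line :: ls, m, f =>
    let stripped := PySem.Str.strip line
    if stripped = pvLogMarker then pvLoopA ls m f
    else if stripped = pvManagedBegin then pvLoopA ls true f
    else if stripped = pvManagedEnd then pvLoopA ls false f
    else if m then pvLoopA ls m f
    else if PySem.Str.startswith stripped "```" then pvLoopA ls m (!f)
    else if f then pvLoopA ls m f
    else if stripped ≠ "" then stripped :: pvLoopA ls m f
    else pvLoopA ls m f

def visible_changelog_lines_py (changelog_text : String) : List String :=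
  let start := PySem.Str.find changelog_text pvLogMarker
  let content := if 0 ≤ start then PySem.Str.slice changelog_text (some start) none else changelog_text
  pvLoopA (PySem.Str.splitlines content) false false

-- ===== PORT B =====
-- Token kind of a stripped line.
def pvClassify (stripped : String) : String :=
  if stripped = pvLogMarker then "skip"
  else if stripped = pvManagedBegin then "begin"
  else if stripped = pvManagedEnd then "end"
  else if PySem.Str.startswith stripped "```" then "fence"
  else if stripped = "" then "blank"
  else "text"

-- Fold step over (managed, fence, reversed accumulator).
def pvStep (state : Bool × Bool × List String) (stripped : String) : Bool × Bool × List String :=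
  let tag := pvClassify stripped
  if tag = "skip" then state
  else if tag = "begin" then (true, state.2.1, state.2.2)
  else if tag = "end" then (false, state.2.1, state.2.2)
  else if state.1 then state
  else if tag = "fence" then (state.1, !state.2.1, state.2.2)
  else if state.2.1 ∨ tag = "blank" then state
  else (state.1, state.2.1, stripped :: state.2.2)

def visible_changelog_lines_py_alt (changelog_text : String) : List String :=
  let idx := PySem.Str.find changelog_text pvLogMarker
  let strippedLines := (PySem.Str.splitlines (PySem.Str.slice changelog_text (some (max idx 0)) none)).map PySem.Str.strip
  (strippedLines.foldl pvStep (false, false, [])).2.2.reverse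

-- ===== PRECONDITION & SPEC =====
def Spec_visible_changelog_lines_py (changelog_text : String) (out : List String) : Prop := out = visible_changelog_lines_py_alt changelog_text
instance (changelog_text : String) (out : List String) : Decidable (Spec_visible_changelog_lines_py changelog_text out) := by unfold Spec_visible_changelog_lines_py; infer_instance

-- ===== CLAIM (what is proved, stated in full; the proofs are below) =====
def Claim_equal_visible_changelog_lines_py : Prop := ∀ (changelog_text : String), Dom_visible_changelog_lines_py changelog_text → Spec_visible_changelog_lines_py changelog_text (visible_changelog_lines_py changelog_text)

-- ===== LEMMAS AND PROOFS =====
-- Invariant: B's fold over the stripped lines accumulates exactly A's output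
-- reversed, in front of whatever is already in the accumulator.
theorem pvFold_eq_loopA : ∀ (ls : List String) (m f : Bool) (acc : List String),
    ((ls.map PySem.Str.strip).foldl pvStep (m, f, acc)).2.2
      = (pvLoopA ls m f).reverse ++ acc := by
  have e1 : pvManagedBegin ≠ pvLogMarker := by decide
  have e2 : pvManagedEnd ≠ pvLogMarker := by decide
  have e3 : pvManagedEnd ≠ pvManagedBegin := by decide
  have e6 : pvLogMarker ≠ "" := by decide
  have e7 : pvManagedBegin ≠ "" := by decide
  have e8 : pvManagedEnd ≠ "" := by decide
  have e9 : PySem.Chars.startswith ([] : List Char) ['`', '`', '`'] = false := by decide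
  intro ls
  induction ls with
  | nil => intro m f acc; rfl
  | cons line ls ih =>
    intro m f acc
    simp only [List.map_cons, List.foldl_cons, pvLoopA, pvStep, pvClassify]
    by_cases h1 : PySem.Str.strip line = pvLogMarker
    · simp [h1, ih]
    by_cases h2 : PySem.Str.strip line = pvManagedBegin
    · simp [h2, e1, ih]
    by_cases h3 : PySem.Str.strip line = pvManagedEnd
    · simp [h3, e2, e3, ih]
    by_cases h4 : PySem.Chars.startswith (PySem.Chars.strip line.toList) ['`', '`', '`'] = true
    · cases m <;> simp [h1, h2, h3, h4, ih]
    by_cases h5 : PySem.Str.strip line = ""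
    · cases m <;> cases f <;> simp [h4, h5, e6, e7, e8, e9, ih]
    · cases m <;> cases f <;> simp [h1, h2, h3, h4, h5, ih]

-- The two "content after the marker" computations agree (slicing from 0 is the
-- identity when the marker is absent, i.e. find = -1).
theorem pvContent_eq (t : String) :
    (if 0 ≤ PySem.Str.find t pvLogMarker then PySem.Str.slice t (some (PySem.Str.find t pvLogMarker)) none else t)
      = PySem.Str.slice t (some (max (PySem.Str.find t pvLogMarker) 0)) none := by
  by_cases h : 0 ≤ PySem.Str.find t pvLogMarker
  · rw [if_pos h, max_eq_left h]
  · rw [if_neg h, max_eq_right (by omega), PySem.Str.slice]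
    simp

-- ===== VERDICT (by name: the statement is the Claim_ definition above) =====
theorem visible_changelog_lines_py_spec : Claim_equal_visible_changelog_lines_py := by
  intro t _
  show pvLoopA (PySem.Str.splitlines
      (if 0 ≤ PySem.Str.find t pvLogMarker then PySem.Str.slice t (some (PySem.Str.find t pvLogMarker)) none else t))
      false false
    = ((((PySem.Str.splitlines (PySem.Str.slice t (some (max (PySem.Str.find t pvLogMarker) 0)) none)).map
        PySem.Str.strip).foldl pvStep (false, false, [])).2.2).reverse
  rw [pvContent_eq, pvFold_eq_loopA]
  simp
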